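-- pv_equiv track=rewrite | github.com/michael131468/v1zo | director.py | count_looped
-- ===== SOURCE A (Python) =====
-- def count_looped(timeline: list[dict], all_video_snippet_ids: set[str]) -> int:
--     """Count slots that reuse an already-used snippet (loop cycles)."""
--     seen: set[str] = set()
--     loops = 0
--     for entry in timeline:
--         sid = entry.get("snippet_id", "")
--         if sid in seen:
--             loops += 1
--         seen.add(sid)
--     return loops
-- ===== SOURCE B (Python) =====
-- def count_looped(timeline, all_video_snippet_ids):
--     """Count slots that reuse an already-used snippet (loop cycles)."""
--     distinct = {entry.get("snippet_id", "") for entry in timeline}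
--     return len(timeline) - len(distinct)
-- ===== Notes on version B (the rewrite author's own statement) =====
-- stated objective: simpler
-- what changed: B aggregates first (a set comprehension of all snippet ids, keeping the empty-string default) and returns len(timeline) - len(distinct ids) by arithmetic, instead of streaming an incremental membership test with a running counter.
import Mathlib
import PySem

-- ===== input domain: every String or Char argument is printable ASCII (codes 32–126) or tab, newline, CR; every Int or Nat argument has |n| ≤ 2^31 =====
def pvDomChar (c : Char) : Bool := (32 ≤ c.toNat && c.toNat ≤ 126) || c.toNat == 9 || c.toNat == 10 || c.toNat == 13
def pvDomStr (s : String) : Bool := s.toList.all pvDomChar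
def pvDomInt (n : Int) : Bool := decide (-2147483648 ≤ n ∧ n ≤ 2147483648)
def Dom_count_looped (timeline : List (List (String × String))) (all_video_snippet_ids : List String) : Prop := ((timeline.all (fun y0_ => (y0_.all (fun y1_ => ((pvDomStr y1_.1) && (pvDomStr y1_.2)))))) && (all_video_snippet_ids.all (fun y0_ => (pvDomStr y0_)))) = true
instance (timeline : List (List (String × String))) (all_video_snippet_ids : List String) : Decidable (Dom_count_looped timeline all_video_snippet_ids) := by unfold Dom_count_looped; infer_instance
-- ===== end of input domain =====

-- ===== PORT A =====
-- B computes len(timeline) - len(distinct snippet ids) by aggregation instead of A's streaming seen-set counter (objective: simpler).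
def count_looped (timeline : List (List (String × String))) (all_video_snippet_ids : List String) : Int :=
  (timeline.foldl
    (fun st entry =>
      let sid := PySem.Dict.getD (PySem.Dict.mk entry) "snippet_id" ""
      let loops := if PySem.Set.contains st.1 sid then st.2 + 1 else st.2
      (PySem.Set.add st.1 sid, loops))
    ((PySem.Set.empty : PySem.Set String), (0 : Int))).2

-- ===== PORT B =====
def count_looped_alt (timeline : List (List (String × String))) (all_video_snippet_ids : List String) : Int :=
  let distinct : PySem.Set String :=
    PySem.Set.ofList (timeline.map (fun entry => PySem.Dict.getD (PySem.Dict.mk entry) "snippet_id" ""))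
  (timeline.length : Int) - (distinct.length : Int)

-- ===== PRECONDITION & SPEC =====
def Spec_count_looped (timeline : List (List (String × String))) (all_video_snippet_ids : List String) (out : Int) : Prop := out = count_looped_alt timeline all_video_snippet_ids
instance (timeline : List (List (String × String))) (all_video_snippet_ids : List String) (out : Int) : Decidable (Spec_count_looped timeline all_video_snippet_ids out) := by unfold Spec_count_looped; infer_instance

-- ===== CLAIM (what is proved, stated in full; the proofs are below) =====
def Claim_equal_count_looped : Prop := ∀ (timeline : List (List (String × String))) (all_video_snippet_ids : List String), Dom_count_looped timeline all_video_snippet_ids → Spec_count_looped timeline all_video_snippet_ids (count_looped timeline all_video_snippet_ids)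

-- ===== LEMMAS AND PROOFS =====

-- ===== VERDICT (by name: the statement is the Claim_ definition above) =====
theorem length_set_add (s : PySem.Set String) (x : String) :
    (PySem.Set.add s x).length = if PySem.Set.contains s x then s.length else s.length + 1 := by
  simp [PySem.Set.add]; split <;> simp

theorem count_looped_invariant (l : List String) (s : PySem.Set String) (c : Int) :
    (l.foldl
      (fun st sid =>
        (PySem.Set.add st.1 sid,
          if PySem.Set.contains st.1 sid then st.2 + 1 else st.2))
      (s, c)).2
    = c + (l.length : Int)
        - (((PySem.Set.update s l).length : Int) - (s.length : Int)) := by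
  induction l generalizing s c with
  | nil => simp [PySem.Set.update]
  | cons x xs ih =>
    have hupd : PySem.Set.update s (x :: xs) = PySem.Set.update (PySem.Set.add s x) xs := by
      simp [PySem.Set.update]
    have hadd := length_set_add s x
    simp only [List.foldl_cons]
    rw [ih]
    rw [hupd]
    by_cases h : PySem.Set.contains s x = true
    · simp only [h, if_pos] at hadd ⊢
      rw [hadd]; simp only [List.length_cons]; push_cast; omega
    · simp only [eq_false_of_ne_true h, if_neg, Bool.false_eq_true, not_false_eq_true] at hadd ⊢
      rw [hadd]; simp only [List.length_cons]; push_cast; omega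

theorem count_looped_spec : Claim_equal_count_looped := by
  intro timeline all_video_snippet_ids _
  unfold Spec_count_looped count_looped count_looped_alt
  have hmap :
      timeline.foldl
        (fun st entry =>
          let sid := PySem.Dict.getD (PySem.Dict.mk entry) "snippet_id" ""
          let loops := if PySem.Set.contains st.1 sid then st.2 + 1 else st.2
          (PySem.Set.add st.1 sid, loops))
        ((PySem.Set.empty : PySem.Set String), (0 : Int))
      = (timeline.map (fun entry => PySem.Dict.getD (PySem.Dict.mk entry) "snippet_id" "")).foldl
          (fun st sid =>
            (PySem.Set.add st.1 sid,
              if PySem.Set.contains st.1 sid then st.2 + 1 else st.2))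
          ((PySem.Set.empty : PySem.Set String), (0 : Int)) := by
    rw [List.foldl_map]
  rw [hmap, count_looped_invariant]
  have hofl : PySem.Set.ofList (timeline.map (fun entry => PySem.Dict.getD (PySem.Dict.mk entry) "snippet_id" ""))
      = PySem.Set.update (PySem.Set.empty : PySem.Set String)
          (timeline.map (fun entry => PySem.Dict.getD (PySem.Dict.mk entry) "snippet_id" "")) := by
    simp [PySem.Set.update, PySem.Set.ofList_eq_foldl, PySem.Set.empty]
  rw [hofl]
  simp [PySem.Set.empty]
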